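-- pv_equiv track=rewrite | github.com/xNitix/ASD_AGH_2023 | Dynamic Programming/sklejanie.py | drugie
-- ===== SOURCE A (Python) =====
-- def drugie(A,k):
--     n = len(A)
--     dp = [[0,0] for _ in range(n)]
--     A.sort(key = lambda x : x[0])
--     A.sort(key = lambda x : x[1])
--     for i in range(n):
--         dp[i]=[A[i],1]
--
--     for i in range(1,n):
--         for j in range(i):
--             if A[i][0] == dp[j][0][1] and dp[j][1] < k:
--                 dp[i][0] = [dp[j][0][0],A[i][1]]
--                 dp[i][1] = dp[j][1] + 1
--
--     return dp[n-1][0]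
-- ===== SOURCE B (Python) =====
-- def drugie(A, k):
--     A.sort(key=lambda x: x[0])
--     A.sort(key=lambda x: x[1])
--     best = {}  # end value -> (chain start, chain length) of the latest chain with length < k
--     res = None
--     for row in A:
--         hit = best.get(row[0])
--         if hit is not None:
--             cur_val, cur_cnt = [hit[0], row[1]], hit[1] + 1
--         else:
--             cur_val, cur_cnt = row, 1
--         if cur_cnt < k:
--             best[row[1]] = (cur_val[0], cur_cnt)
--         res = cur_val
--     return res
-- ===== Notes on version B (the rewrite author's own statement) =====
-- stated objective: faster
-- what changed: B replaces A's O(n^2) scan of all earlier dp entries for the latest gluable predecessor chain by a single pass that keeps a dict mapping chain end value to the latest chain with count < k, giving O(1) lookup per element after the same sorts.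
import Mathlib
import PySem

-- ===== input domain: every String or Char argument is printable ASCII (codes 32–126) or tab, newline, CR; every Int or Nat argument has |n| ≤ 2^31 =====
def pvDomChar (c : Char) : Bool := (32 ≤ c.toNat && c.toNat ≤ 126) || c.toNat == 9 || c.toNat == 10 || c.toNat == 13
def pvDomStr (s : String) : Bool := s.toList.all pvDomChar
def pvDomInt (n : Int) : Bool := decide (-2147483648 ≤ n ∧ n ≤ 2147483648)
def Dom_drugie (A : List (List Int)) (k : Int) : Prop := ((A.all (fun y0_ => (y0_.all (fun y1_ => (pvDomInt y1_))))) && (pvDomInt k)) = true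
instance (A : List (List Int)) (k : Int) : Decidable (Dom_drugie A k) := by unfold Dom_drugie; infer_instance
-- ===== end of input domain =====

-- B replaces A's quadratic inner scan for the latest gluable predecessor chain by a dict keyed on
-- chain end value (O(n log n) vs O(n^2)); both sort A in place, equivalence is about the return value.

-- ===== PORT A =====
-- the body of A's inner 'for j in range(i)' loop; dp entries [chain, count] are modelled as (List Int × Int)
def pvInnerA (k : Int) (A2 : List (List Int)) (i : Int)
    (dp : List (List Int × Int)) (j : Int) : List (List Int × Int) :=
  let dpj := PySem.List.pyGetD dp j ([], 0)
  if PySem.List.pyGetD (PySem.List.pyGetD A2 i []) 0 0 = PySem.List.pyGetD dpj.1 1 0 ∧ dpj.2 < k then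
    PySem.List.pySetD dp i
      ([PySem.List.pyGetD dpj.1 0 0, PySem.List.pyGetD (PySem.List.pyGetD A2 i []) 1 0], dpj.2 + 1)
  else dp

-- the body of A's outer 'for i in range(1, n)' loop
def pvOuterA (k : Int) (A2 : List (List Int)) (dp : List (List Int × Int)) (i : Int) :
    List (List Int × Int) :=
  (PySem.List.pyRange 0 i 1).foldl (pvInnerA k A2 i) dp

def drugie (A : List (List Int)) (k : Int) : List Int :=
  let n := A.length
  -- the [[0,0],…] placeholder row is modelled as ([0,0], 0) : List Int × Int (never read before overwritten)
  let A2 := PySem.List.sorted (PySem.List.sorted A (fun x => PySem.List.pyGetD x 0 0) false)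
              (fun x => PySem.List.pyGetD x 1 0) false
  let dp := (PySem.List.pyRange 0 (n : Int) 1).foldl
      (fun dp i => PySem.List.pySetD dp i (PySem.List.pyGetD A2 i [], 1))
      (A2.map (fun _ => (([0, 0] : List Int), (0 : Int))))
  let dp := (PySem.List.pyRange 1 (n : Int) 1).foldl (pvOuterA k A2) dp
  (PySem.List.pyGetD dp ((n : Int) - 1) ([], 0)).1

-- ===== PORT B =====
-- the body of B's single 'for row in A' loop; state = (best dict, last chain value); Python's
-- initial res = None is modelled as [] (Pre_ excludes the empty list, where B returns None)
def pvStepB (k : Int) (st : PySem.Dict Int (Int × Int) × List Int) (row : List Int) :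
    PySem.Dict Int (Int × Int) × List Int :=
  let cur : List Int × Int :=
    match st.1.get? (PySem.List.pyGetD row 0 0) with
    | some hit => ([hit.1, PySem.List.pyGetD row 1 0], hit.2 + 1)
    | none => (row, 1)
  let best := if cur.2 < k then
      st.1.insert (PySem.List.pyGetD row 1 0) (PySem.List.pyGetD cur.1 0 0, cur.2)
    else st.1
  (best, cur.1)

def drugie_alt (A : List (List Int)) (k : Int) : List Int :=
  let A2 := PySem.List.sorted (PySem.List.sorted A (fun x => PySem.List.pyGetD x 0 0) false)
              (fun x => PySem.List.pyGetD x 1 0) false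
  (A2.foldl (pvStepB k) (PySem.Dict.empty, ([] : List Int))).2

-- ===== PRECONDITION & SPEC =====
-- Python A raises IndexError on the empty list (dp[n-1]) and on any row shorter than 2 (sort keys
-- x[0], x[1] and the indexing A[i][0], A[i][1]); exactly those inputs are excluded.
def Pre_drugie (A : List (List Int)) (k : Int) : Prop := A ≠ [] ∧ ∀ r ∈ A, 2 ≤ r.length
instance (A : List (List Int)) (k : Int) : Decidable (Pre_drugie A k) := by
  unfold Pre_drugie; infer_instance
def pvWitness_drugie : List (List Int) × Int := ([[1, 2], [2, 3]], 2)

def Spec_drugie (A : List (List Int)) (k : Int) (out : List Int) : Prop := out = drugie_alt A k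
instance (A : List (List Int)) (k : Int) (out : List Int) : Decidable (Spec_drugie A k out) := by
  unfold Spec_drugie; infer_instance

-- ===== CLAIM (what is proved, stated in full; the proofs are below) =====
def Claim_equal_drugie : Prop :=
  ∀ (A : List (List Int)) (k : Int), Dom_drugie A k → Pre_drugie A k → Spec_drugie A k (drugie A k)

-- ===== LEMMAS AND PROOFS =====

-- reference chain builder both ports are reduced to, over the sorted list S:
-- pvFind returns (start, count) of the LAST already-built chain ending at v with count < k
def pvFind (k : Int) (done : List (List Int × Int)) (v : Int) : Option (Int × Int) :=
  ((done.filter fun e => PySem.List.pyGetD e.1 1 0 == v && decide (e.2 < k)).getLast?).map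
    fun e => (PySem.List.pyGetD e.1 0 0, e.2)

def pvNext (k : Int) (done : List (List Int × Int)) (row : List Int) : List Int × Int :=
  match pvFind k done (PySem.List.pyGetD row 0 0) with
  | some sc => ([sc.1, PySem.List.pyGetD row 1 0], sc.2 + 1)
  | none => (row, 1)

def pvBuildFrom (k : Int) (done : List (List Int × Int)) (rows : List (List Int)) :
    List (List Int × Int) :=
  rows.foldl (fun d r => d ++ [pvNext k d r]) done

lemma pvBuildFrom_nil (k : Int) (done : List (List Int × Int)) : pvBuildFrom k done [] = done := rfl

lemma pvBuildFrom_cons (k : Int) (done : List (List Int × Int)) (r : List Int) (rs : List (List Int)) :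
    pvBuildFrom k done (r :: rs) = pvBuildFrom k (done ++ [pvNext k done r]) rs := rfl

lemma pvBuildFrom_append (k : Int) (done : List (List Int × Int)) (l₁ l₂ : List (List Int)) :
    pvBuildFrom k done (l₁ ++ l₂) = pvBuildFrom k (pvBuildFrom k done l₁) l₂ := by
  simp [pvBuildFrom, List.foldl_append]

lemma pvBuildFrom_length (k : Int) (done : List (List Int × Int)) (rows : List (List Int)) :
    (pvBuildFrom k done rows).length = done.length + rows.length := by
  induction rows generalizing done with
  | nil => simp [pvBuildFrom]
  | cons r rs ih => rw [pvBuildFrom_cons, ih]; simp; omega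

lemma pvNext_end (k : Int) (done : List (List Int × Int)) (row : List Int) :
    PySem.List.pyGetD (pvNext k done row).1 1 0 = PySem.List.pyGetD row 1 0 := by
  unfold pvNext; cases pvFind k done (PySem.List.pyGetD row 0 0) <;> simp [PySem.List.pyGetD]

lemma pvFind_append (k : Int) (done : List (List Int × Int)) (c : List Int × Int) (v : Int) :
    pvFind k (done ++ [c]) v =
      if PySem.List.pyGetD c.1 1 0 = v ∧ c.2 < k then some (PySem.List.pyGetD c.1 0 0, c.2)
      else pvFind k done v := by
  unfold pvFind
  rw [List.filter_append]
  by_cases h1 : PySem.List.pyGetD c.1 1 0 = v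
  · by_cases h2 : c.2 < k
    · simp [h1, h2]
    · simp [h1, h2]
  · simp [h1]

-- ===== B side: the dict along B's fold tabulates pvFind of the chains built so far =====
lemma B_fold (k : Int) (rows : List (List Int)) :
    ∀ (done : List (List Int × Int)) (st : PySem.Dict Int (Int × Int) × List Int),
      (∀ v, st.1.get? v = pvFind k done v) →
      (rows.foldl (pvStepB k) st).2 =
        if rows.isEmpty then st.2
        else ((pvBuildFrom k done rows).getLast?.getD ([], 0)).1 := by
  induction rows with
  | nil => intro done st _; simp
  | cons r rs ih =>
    intro done st hinv
    have hcur : pvStepB k st r =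
        (if (pvNext k done r).2 < k then
            st.1.insert (PySem.List.pyGetD r 1 0)
              (PySem.List.pyGetD (pvNext k done r).1 0 0, (pvNext k done r).2)
          else st.1, (pvNext k done r).1) := by
      unfold pvStepB pvNext
      rw [hinv]
    have hinv' : ∀ v, (pvStepB k st r).1.get? v = pvFind k (done ++ [pvNext k done r]) v := by
      intro v
      rw [hcur, pvFind_append, pvNext_end]
      by_cases hk : (pvNext k done r).2 < k <;> by_cases hv : PySem.List.pyGetD r 1 0 = v
      · simp [hk, hv]
      · rw [if_pos hk, PySem.Dict.get?_insert]
        rw [if_neg (show ¬ v = PySem.List.pyGetD r 1 0 from fun h => hv h.symm)]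
        simp [hk, hv, hinv v]
      · simp [hk, hv, hinv v]
      · simp [hk, hv, hinv v]
    have := ih (done ++ [pvNext k done r]) (pvStepB k st r) hinv'
    rw [List.foldl_cons, this, pvBuildFrom_cons]
    cases rs with
    | nil => simp [pvBuildFrom, hcur]
    | cons r' rs' => simp

-- ===== A side =====

-- a fold writing f i at position i for i in range(m) rewrites the first m entries
lemma foldl_set_range {α : Type} (f : Int → α) (l : List α) (m : Nat) (hm : m ≤ l.length) :
    (PySem.List.pyRange 0 (m : Int) 1).foldl (fun dp i => PySem.List.pySetD dp i (f i)) l =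
      (List.range m).map (fun j : Nat => f (j : Int)) ++ l.drop m := by
  induction m with
  | zero => simp [PySem.List.pyRange_one_eq_nil]
  | succ m ih =>
    have hm' : m ≤ l.length := by omega
    have hr : PySem.List.pyRange 0 ((m : Int) + 1) 1 =
        PySem.List.pyRange 0 (m : Int) 1 ++ [(m : Int)] :=
      PySem.List.pyRange_one_succ_right (by positivity)
    have hcast : ((m + 1 : Nat) : Int) = (m : Int) + 1 := by push_cast; ring
    rw [hcast, hr, List.foldl_append, ih hm']
    simp only [List.foldl_cons, List.foldl_nil, PySem.List.pySetD_natCast]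
    rw [List.set_append]
    have hlen : ((List.range m).map (fun j : Nat => f (j : Int))).length = m := by simp
    rw [hlen, if_neg (by omega)]
    rw [List.range_succ]
    simp only [List.map_append, List.map_cons, List.map_nil, List.append_assoc,
      List.singleton_append]
    congr 1
    rw [List.drop_eq_getElem_cons (show m < l.length by omega), Nat.sub_self]
    rfl

-- the dp array after the init loop 'for i in range(n): dp[i] = [A[i], 1]'
lemma A_init (A2 : List (List Int)) :
    (PySem.List.pyRange 0 (A2.length : Int) 1).foldl
        (fun dp i => PySem.List.pySetD dp i (PySem.List.pyGetD A2 i [], 1))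
        (A2.map (fun _ => (([0, 0] : List Int), (0 : Int)))) =
      A2.map (fun a => (a, (1 : Int))) := by
  rw [foldl_set_range (fun i => (PySem.List.pyGetD A2 i [], 1))
        (A2.map (fun _ => (([0, 0] : List Int), (0 : Int)))) A2.length (by simp)]
  have hnil : (A2.map (fun _ => (([0, 0] : List Int), (0 : Int)))).drop A2.length = [] := by simp
  rw [hnil, List.append_nil]
  apply List.ext_getElem
  · simp
  · intro j h1 h2
    have hj : j < A2.length := by simpa using h2
    simp [hj, List.getD]

-- A's inner loop over j in range(m) equals a set at i with the last valid predecessor among dp.take m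
lemma A_inner (k : Int) (A2 : List (List Int)) (dp : List (List Int × Int)) (i m : Nat)
    (hm : m ≤ i) (hi : i < dp.length) :
    (PySem.List.pyRange 0 (m : Int) 1).foldl (pvInnerA k A2 (i : Int)) dp =
      match pvFind k (dp.take m) (PySem.List.pyGetD (PySem.List.pyGetD A2 (i : Int) []) 0 0) with
      | some sc => dp.set i
          ([sc.1, PySem.List.pyGetD (PySem.List.pyGetD A2 (i : Int) []) 1 0], sc.2 + 1)
      | none => dp := by
  induction m with
  | zero => simp [PySem.List.pyRange_one_eq_nil, pvFind]
  | succ m ih =>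
    have hmi : m < i := by omega
    have hmd : m < dp.length := by omega
    have hr : PySem.List.pyRange 0 ((m : Int) + 1) 1 =
        PySem.List.pyRange 0 (m : Int) 1 ++ [(m : Int)] :=
      PySem.List.pyRange_one_succ_right (by positivity)
    have hcast : ((m + 1 : Nat) : Int) = (m : Int) + 1 := by push_cast; ring
    rw [hcast, hr, List.foldl_append, ih (by omega)]
    set x0 := PySem.List.pyGetD (PySem.List.pyGetD A2 (i : Int) []) 0 0 with hx0
    set x1 := PySem.List.pyGetD (PySem.List.pyGetD A2 (i : Int) []) 1 0 with hx1
    rw [List.take_add_one, List.getElem?_eq_getElem hmd]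
    simp only [Option.toList_some]
    rw [pvFind_append]
    -- the entry read at index m is dp[m] whether or not index i was already overwritten
    have hread : ∀ (c : List Int × Int),
        PySem.List.pyGetD (dp.set i c) (m : Int) ([], 0) = dp[m] := by
      intro c
      simp [List.getD, List.getElem?_set_ne (by omega : i ≠ m), List.getElem?_eq_getElem hmd]
    have hread0 : PySem.List.pyGetD dp (m : Int) ([], 0) = dp[m] := by
      simp [List.getD, List.getElem?_eq_getElem hmd]
    cases hf : pvFind k (dp.take m) x0 with
    | none =>
      simp only [List.foldl_cons, List.foldl_nil, pvInnerA, hread0]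
      by_cases hc : x0 = PySem.List.pyGetD dp[m].1 1 0 ∧ dp[m].2 < k
      · rw [if_pos hc, if_pos ⟨hc.1.symm, hc.2⟩]
        simp only [PySem.List.pySetD_natCast]
        rw [hx1]
      · rw [if_neg hc, if_neg (fun h => hc ⟨h.1.symm, h.2⟩)]
    | some sc =>
      simp only [List.foldl_cons, List.foldl_nil, pvInnerA, hread]
      by_cases hc : x0 = PySem.List.pyGetD dp[m].1 1 0 ∧ dp[m].2 < k
      · rw [if_pos hc, if_pos ⟨hc.1.symm, hc.2⟩]
        simp only [PySem.List.pySetD_natCast, List.set_set]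
        rw [hx1]
      · rw [if_neg hc, if_neg (fun h => hc ⟨h.1.symm, h.2⟩)]

-- the dp array after the outer loop is the full chain table pvBuildFrom k [] S
lemma A_outer (k : Int) (A2 : List (List Int)) (i : Nat) (h1 : 1 ≤ i) (hn : i ≤ A2.length) :
    (PySem.List.pyRange 1 (i : Int) 1).foldl (pvOuterA k A2) (A2.map (fun a => (a, (1 : Int)))) =
      pvBuildFrom k [] (A2.take i) ++ (A2.drop i).map (fun a => (a, (1 : Int))) := by
  induction i with
  | zero => omega
  | succ i ih =>
    by_cases hi1 : i = 0
    · subst hi1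
      cases A2 with
      | nil => simp at hn
      | cons a t =>
        simp [PySem.List.pyRange_one_eq_nil, pvBuildFrom, pvNext, pvFind]
    · have h1i : 1 ≤ i := by omega
      have hin : i < A2.length := by omega
      have hr : PySem.List.pyRange 1 ((i : Int) + 1) 1 =
          PySem.List.pyRange 1 (i : Int) 1 ++ [(i : Int)] :=
        PySem.List.pyRange_one_succ_right (by exact_mod_cast h1i)
      have hcast : ((i + 1 : Nat) : Int) = (i : Int) + 1 := by push_cast; ring
      rw [hcast, hr, List.foldl_append, ih h1i (by omega)]
      set Bi := pvBuildFrom k [] (A2.take i) with hBi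
      have hBlen : Bi.length = i := by
        rw [hBi, pvBuildFrom_length]; simp [hin.le]
      have hΦlen : (Bi ++ (A2.drop i).map (fun a => (a, (1 : Int)))).length = A2.length := by
        simp [hBlen]; omega
      simp only [List.foldl_cons, List.foldl_nil, pvOuterA]
      rw [A_inner k A2 _ i i le_rfl (by omega)]
      have htake : (Bi ++ (A2.drop i).map (fun a => (a, (1 : Int)))).take i = Bi := by
        rw [← hBlen, List.take_left]
      have hAi : PySem.List.pyGetD A2 (i : Int) [] = A2[i] := by
        simp [List.getD, List.getElem?_eq_getElem hin]
      have hdrop : (A2.drop i).map (fun a => (a, (1 : Int))) =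
          (A2[i], (1 : Int)) :: (A2.drop (i + 1)).map (fun a => (a, (1 : Int))) := by
        rw [List.drop_eq_getElem_cons hin, List.map_cons]
      have hnext : pvBuildFrom k [] (A2.take (i + 1)) = Bi ++ [pvNext k Bi A2[i]] := by
        rw [List.take_add_one, List.getElem?_eq_getElem hin]
        simp only [Option.toList_some]
        rw [pvBuildFrom_append, ← hBi, pvBuildFrom_cons, pvBuildFrom_nil]
      rw [htake, hAi]
      cases hf : pvFind k Bi (PySem.List.pyGetD A2[i] 0 0) with
      | none =>
        rw [hnext]
        simp only [pvNext, hf]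
        rw [hdrop, List.append_assoc]
        rfl
      | some sc =>
        rw [hnext]
        simp only [pvNext, hf]
        rw [hdrop, List.set_append, hBlen, if_neg (by omega), List.append_assoc]
        simp only [Nat.sub_self, List.singleton_append, List.set_cons_zero]

-- ===== VERDICT (by name: the statement is the Claim_ definition above) =====
theorem drugie_spec : Claim_equal_drugie := by
  intro A k _ hpre
  unfold Spec_drugie
  simp only [drugie, drugie_alt]
  generalize hS : PySem.List.sorted (PySem.List.sorted A (fun x => PySem.List.pyGetD x 0 0) false)
      (fun x => PySem.List.pyGetD x 1 0) false = S
  have hlen : A.length = S.length := by rw [← hS]; simp [PySem.List.length_sorted]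
  have hSne : S ≠ [] := by
    rw [← hS]
    simp only [ne_eq, PySem.List.sorted_eq_nil_iff]
    exact hpre.1
  have hS1 : 1 ≤ S.length := by
    cases S with
    | nil => exact absurd rfl hSne
    | cons a t => simp
  rw [hlen, A_init S, A_outer k S S.length hS1 le_rfl]
  simp only [List.take_length, List.drop_length, List.map_nil, List.append_nil]
  have hB := B_fold k S [] (PySem.Dict.empty, ([] : List Int))
      (fun v => by simp [PySem.Dict.get?_empty, pvFind])
  rw [hB, if_neg (by simp [hSne])]
  have hblen : (pvBuildFrom k [] S).length = S.length := by
    rw [pvBuildFrom_length]; simp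
  have hcast : (S.length : Int) - 1 = ((S.length - 1 : Nat) : Int) := by
    push_cast [hS1]; omega
  rw [hcast]
  simp only [PySem.List.pyGetD_natCast]
  rw [List.getLast?_eq_getElem?, hblen, List.getD]
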